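-- pv_equiv track=rewrite | github.com/ccsandhanshive/Practics-Code | Practice1/codejam1.py | ans
-- ===== SOURCE A (Python) =====
-- def ans(number):
--     c=1
--     A,B=0,0
--     while(number!=0):
--         rem=number%10
--         if rem==4:
--             A+=c*2
--             B+=c*2
--             c*=10
--         else:
--             A+=c*rem
--             c*=10
--         number//=10
--     return A,B
-- ===== SOURCE B (Python) =====
-- def ans(number):
--     # A = number with every digit 4 replaced by 2, built by recursion on the digits;
--     # B = number - A, since each 4 splits as 2+2 and every other digit goes wholly to A.
--     def rep(n):
--         if n == 0:
--             return 0
--         d = n % 10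
--         return 10 * rep(n // 10) + (2 if d == 4 else d)
--     a = rep(number)
--     return a, number - a
-- ===== Notes on version B (the rewrite author's own statement) =====
-- stated objective: simpler
-- what changed: Replaces the three-accumulator while loop (place value c, A, B) by one recursive digit-replace computing A alone, and obtains B as number - A via the identity A + B = number.
import Mathlib
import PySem

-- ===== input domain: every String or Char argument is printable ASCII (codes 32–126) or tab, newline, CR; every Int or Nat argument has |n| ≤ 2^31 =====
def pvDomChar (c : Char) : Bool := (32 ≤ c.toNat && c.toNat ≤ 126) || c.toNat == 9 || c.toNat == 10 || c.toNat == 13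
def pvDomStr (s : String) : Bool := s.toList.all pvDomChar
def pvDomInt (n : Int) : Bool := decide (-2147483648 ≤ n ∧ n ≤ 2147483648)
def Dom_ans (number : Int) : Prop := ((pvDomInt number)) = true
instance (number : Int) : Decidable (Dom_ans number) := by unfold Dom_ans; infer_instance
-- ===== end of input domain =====

-- B replaces A's three-accumulator while loop by one recursive digit-replace plus B = number - A; return value only, no side effects.

-- ===== PORT A =====
-- A's while loop as fuel recursion over the same state (c, A, B, number); the fuel
-- only makes the recursion total — for number ≥ 0 (Pre_) it never runs out.
def ansLoop (fuel : Nat) (number c A B : Int) : Int × Int :=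
  match fuel with
  | 0 => (A, B)
  | f + 1 =>
    if number = 0 then (A, B)
    else
      let rem := PySem.Int.mod number 10
      if rem = 4 then
        ansLoop f (PySem.Int.floordiv number 10) (c * 10) (A + c * 2) (B + c * 2)
      else
        ansLoop f (PySem.Int.floordiv number 10) (c * 10) (A + c * rem) B

def ans (number : Int) : Int × Int :=
  ansLoop (number.toNat + 1) number 1 0 0

-- ===== PORT B =====
-- Source B's helper rep; the `n ≤ 0` guard only makes it total (Python's base case is n == 0,
-- and rep is never reached with n < 0 inside Pre_).
def repAlt (n : Int) : Int :=
  if h : n ≤ 0 then 0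
  else
    let d := PySem.Int.mod n 10
    10 * repAlt (PySem.Int.floordiv n 10) + (if d = 4 then 2 else d)
termination_by n.toNat
decreasing_by
  simp [PySem.Int.floordiv, Int.fdiv_eq_ediv]
  omega

def ans_alt (number : Int) : Int × Int :=
  let a := repAlt number
  (a, number - a)

-- ===== PRECONDITION & SPEC =====
-- Pre_: A's loop terminates exactly for number ≥ 0 (for negative input, number //= 10 stays at -1 forever).
def Pre_ans (number : Int) : Prop := 0 ≤ number
instance (number : Int) : Decidable (Pre_ans number) := by unfold Pre_ans; infer_instance
def pvWitness_ans : Int := 1234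

def Spec_ans (number : Int) (out : Int × Int) : Prop := out = ans_alt number
instance (number : Int) (out : Int × Int) : Decidable (Spec_ans number out) := by unfold Spec_ans; infer_instance

-- ===== CLAIM (what is proved, stated in full; the proofs are below) =====
def Claim_equal_ans : Prop := ∀ (number : Int), Dom_ans number → Pre_ans number → Spec_ans number (ans number)

-- ===== LEMMAS AND PROOFS =====

theorem repAlt_zero : repAlt 0 = 0 := by rw [repAlt.eq_def]; simp

theorem repAlt_pos {n : Int} (h : 0 < n) :
    repAlt n = 10 * repAlt (n / 10) + (if n % 10 = 4 then 2 else n % 10) := by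
  rw [repAlt.eq_def]
  simp [PySem.Int.mod, PySem.Int.floordiv, Int.fmod_eq_emod, Int.fdiv_eq_ediv, h.not_ge]

-- Loop invariant: with enough fuel and n ≥ 0, the loop adds c·rep(n) to A and c·(n − rep(n)) to B.
theorem ansLoop_inv (fuel : Nat) :
    ∀ (n c A B : Int), 0 ≤ n → n.toNat < fuel →
      ansLoop fuel n c A B = (A + c * repAlt n, B + c * (n - repAlt n)) := by
  induction fuel with
  | zero => intro n c A B hn hf; omega
  | succ f ih =>
    intro n c A B hn hf
    by_cases h0 : n = 0
    · subst h0; simp [ansLoop, repAlt_zero]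
    · have hpos : 0 < n := lt_of_le_of_ne hn (Ne.symm h0)
      have hdiv : 0 ≤ n / 10 := Int.ediv_nonneg hn (by norm_num)
      have hlt : (n / 10).toNat < f := by omega
      have hrep := repAlt_pos hpos
      have hmod : PySem.Int.mod n 10 = n % 10 := by
        simp [PySem.Int.mod, Int.fmod_eq_emod]
      have hfdiv : PySem.Int.floordiv n 10 = n / 10 := by
        simp [PySem.Int.floordiv, Int.fdiv_eq_ediv]
      have hdm : 10 * (n / 10) + n % 10 = n := Int.mul_ediv_add_emod n 10
      rw [ansLoop]
      simp only [h0, if_false, hmod, hfdiv]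
      by_cases h4 : n % 10 = 4
      · rw [if_pos h4, ih _ _ _ _ hdiv hlt, hrep, if_pos h4]
        rw [h4] at hdm
        simp only [Prod.mk.injEq]
        exact ⟨by ring, by linear_combination c * hdm⟩
      · rw [if_neg h4, ih _ _ _ _ hdiv hlt, hrep, if_neg h4]
        simp only [Prod.mk.injEq]
        exact ⟨by ring, by linear_combination c * hdm⟩

-- ===== VERDICT (by name: the statement is the Claim_ definition above) =====
theorem ans_spec : Claim_equal_ans := by
  intro number _ hpre
  unfold Spec_ans ans ans_alt
  rw [ansLoop_inv _ number 1 0 0 hpre (by omega)]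
  simp
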